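-- pv_equiv track=rewrite | github.com/MichielMe/api-monitor | app/config_generator.py | remove_conflicting_sections
-- ===== SOURCE A (Python) =====
-- def remove_conflicting_sections(config):
--     """Remove conflicting sections from the configuration to avoid conflicts"""
--     lines = config.split("\n")
--     result_lines = []
--     skip_section = False
--
--     for line in lines:
--         # Skip conflicting sections that would be duplicated
--         if line.startswith("[agent]") or line.startswith("[global_tags]"):
--             skip_section = True
--         elif line.startswith("[[outputs."):
--             skip_section = True
--         elif skip_section and line.startswith("["):
--             skip_section = False
--
--         if not skip_section:
--             result_lines.append(line)
--
--     return "\n".join(result_lines)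
-- ===== SOURCE B (Python) =====
-- def remove_conflicting_sections(config):
--     """Remove conflicting sections from the configuration to avoid conflicts"""
--     bad = ("[agent]", "[global_tags]", "[[outputs.")
--     sections = [[]]
--     for line in config.split("\n"):
--         if line.startswith("["):
--             sections.append([])
--         sections[-1].append(line)
--     kept = [sec for sec in sections if not sec or not sec[0].startswith(bad)]
--     return "\n".join(line for sec in kept for line in sec)
-- ===== Notes on version B (the rewrite author's own statement) =====
-- stated objective: alternative
-- what changed: Replaced the single-pass skip-flag state machine with a two-stage group-then-filter shape: lines are first grouped into sections at each '['-header (with a preamble group), then whole sections with a conflicting header are dropped and the kept groups are flattened and joined.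
import Mathlib
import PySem

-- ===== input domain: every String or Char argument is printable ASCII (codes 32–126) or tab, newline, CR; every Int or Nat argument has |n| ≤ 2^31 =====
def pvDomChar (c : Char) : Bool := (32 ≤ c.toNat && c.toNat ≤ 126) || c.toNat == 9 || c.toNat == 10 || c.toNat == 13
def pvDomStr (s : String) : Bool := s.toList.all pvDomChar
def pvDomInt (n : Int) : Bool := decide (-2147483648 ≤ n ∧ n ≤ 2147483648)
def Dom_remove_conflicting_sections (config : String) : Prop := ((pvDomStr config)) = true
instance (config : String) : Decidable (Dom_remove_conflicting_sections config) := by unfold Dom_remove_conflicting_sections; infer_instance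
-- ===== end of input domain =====

-- ===== PORT A =====
-- B replaces A's skip-flag state machine by group-into-sections-then-filter (objective: alternative, same O(n) cost).
-- A-side helper: the loop body of A, one step of the fold (literal transliteration of the loop).
def pvStepA (st : List String × Bool) (line : String) : List String × Bool :=
  let skip_section :=
    if PySem.Str.startswith line "[agent]" || PySem.Str.startswith line "[global_tags]" then true
    else if PySem.Str.startswith line "[[outputs." then true
    else if st.2 && PySem.Str.startswith line "[" then false
    else st.2
  if !skip_section then (st.1 ++ [line], skip_section) else (st.1, skip_section)

-- config.split("\n") with a nonempty separator: PySem.Chars.splitOn on the code points, exact.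
def pvSplitLines (config : String) : List String :=
  (PySem.Chars.splitOn config.toList "\n".toList).map String.ofList

def remove_conflicting_sections (config : String) : String :=
  let lines := pvSplitLines config
  let st := lines.foldl pvStepA ([], false)
  PySem.Str.join "\n" st.1

-- ===== PORT B =====
-- line.startswith(bad) with the tuple of the three conflicting prefixes
def pvBad (line : String) : Bool :=
  PySem.Str.startswith line "[agent]" || PySem.Str.startswith line "[global_tags]" ||
    PySem.Str.startswith line "[[outputs."

-- one step of B's grouping loop: start a new section on a '[' line, then append the line to the
-- last section (sections held most-recent-first and each section's lines reversed, as a fold builds them)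
def pvGroupStep (secs : List (List String)) (line : String) : List (List String) :=
  let secs := if PySem.Str.startswith line "[" then [] :: secs else secs
  match secs with
  | [] => [[line]]
  | s :: rest => (line :: s) :: rest

def pvKeep (sec : List String) : Bool :=
  match sec with
  | [] => true
  | h :: _ => !pvBad h

def remove_conflicting_sections_alt (config : String) : String :=
  let lines := pvSplitLines config
  let sections := (lines.foldl pvGroupStep [[]]).reverse.map List.reverse
  let kept := sections.filter pvKeep
  PySem.Str.join "\n" kept.flatten

-- ===== PRECONDITION & SPEC =====
def Spec_remove_conflicting_sections (config : String) (out : String) : Prop := out = remove_conflicting_sections_alt config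
instance (config : String) (out : String) : Decidable (Spec_remove_conflicting_sections config out) := by unfold Spec_remove_conflicting_sections; infer_instance

-- ===== CLAIM (what is proved, stated in full; the proofs are below) =====
def Claim_equal_remove_conflicting_sections : Prop := ∀ (config : String), Dom_remove_conflicting_sections config → Spec_remove_conflicting_sections config (remove_conflicting_sections config)

-- ===== LEMMAS AND PROOFS =====

-- A's loop as head-first recursion over the line list
def pvARun (skip : Bool) : List String → List String
  | [] => []
  | l :: ls =>
    let skip' :=
      if PySem.Str.startswith l "[agent]" || PySem.Str.startswith l "[global_tags]" then true
      else if PySem.Str.startswith l "[[outputs." then true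
      else if skip && PySem.Str.startswith l "[" then false
      else skip
    if skip' then pvARun skip' ls else l :: pvARun skip' ls

-- B's kept-lines output as head-first recursion, parametrised by whether the open section is conflicting
def pvBRun (curBad : Bool) : List String → List String
  | [] => []
  | l :: ls =>
    if PySem.Str.startswith l "[" then
      if pvBad l then pvBRun true ls else l :: pvBRun false ls
    else
      if curBad then pvBRun curBad ls else l :: pvBRun curBad ls

-- output contributed by the already-finished sections / by the currently open section
def pvP (ds : List (List String)) : List String :=
  ((ds.reverse.map List.reverse).filter pvKeep).flatten

def pvK (c : List String) : List String :=
  if pvKeep c.reverse then c.reverse else []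

def pvBadCur (c : List String) : Bool :=
  match c.getLast? with
  | none => false
  | some h => pvBad h

theorem pv_sw_transC (s p q : List Char) (hpq : q <+: p)
    (h : PySem.Chars.startswith s p = true) : PySem.Chars.startswith s q = true := by
  simp only [PySem.Chars.startswith_iff] at h ⊢
  exact hpq.trans h

theorem pv_not_br_one (s : List Char) (p : List Char) (hp : ['['] <+: p)
    (hbr : PySem.Chars.startswith s ['['] = false) : PySem.Chars.startswith s p = false := by
  cases hx : PySem.Chars.startswith s p with
  | false => rfl
  | true => rw [pv_sw_transC s p ['['] hp hx] at hbr; exact Bool.noConfusion hbr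

theorem pv_not_br_not_bad (l : String)
    (hbr : PySem.Chars.startswith l.toList ['['] = false) : pvBad l = false := by
  cases hx : pvBad l with
  | false => rfl
  | true =>
    simp only [pvBad, PySem.Str.startswith_eq, Bool.or_eq_true] at hx
    rcases hx with (h | h) | h
    · rw [pv_sw_transC l.toList _ ['['] (by decide) h] at hbr; exact Bool.noConfusion hbr
    · rw [pv_sw_transC l.toList _ ['['] (by decide) h] at hbr; exact Bool.noConfusion hbr
    · rw [pv_sw_transC l.toList _ ['['] (by decide) h] at hbr; exact Bool.noConfusion hbr

theorem pv_foldA (ls : List String) : ∀ (acc : List String) (skip : Bool),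
    (ls.foldl pvStepA (acc, skip)).1 = acc ++ pvARun skip ls := by
  induction ls with
  | nil => intro acc skip; simp [pvARun]
  | cons l ls ih =>
    intro acc skip
    by_cases h1 : PySem.Chars.startswith l.toList ['[', 'a', 'g', 'e', 'n', 't', ']'] = true <;>
      by_cases h2 : PySem.Chars.startswith l.toList ['[', 'g', 'l', 'o', 'b', 'a', 'l', '_', 't', 'a', 'g', 's', ']'] = true <;>
        by_cases h3 : PySem.Chars.startswith l.toList ['[', '[', 'o', 'u', 't', 'p', 'u', 't', 's', '.'] = true <;>
          by_cases hbr : PySem.Chars.startswith l.toList ['['] = true <;>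
            cases skip <;>
              simp [pvStepA, pvARun, h1, h2, h3, hbr, ih]

theorem pv_aRun_eq_bRun (ls : List String) : ∀ (skip : Bool),
    pvARun skip ls = pvBRun skip ls := by
  induction ls with
  | nil => intro skip; rfl
  | cons l ls ih =>
    intro skip
    by_cases hbr : PySem.Chars.startswith l.toList ['['] = true
    · by_cases h1 : PySem.Chars.startswith l.toList ['[', 'a', 'g', 'e', 'n', 't', ']'] = true <;>
        by_cases h2 : PySem.Chars.startswith l.toList ['[', 'g', 'l', 'o', 'b', 'a', 'l', '_', 't', 'a', 'g', 's', ']'] = true <;>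
          by_cases h3 : PySem.Chars.startswith l.toList ['[', '[', 'o', 'u', 't', 'p', 'u', 't', 's', '.'] = true <;>
            cases skip <;>
              simp [pvARun, pvBRun, pvBad, h1, h2, h3, hbr, ih]
    · simp only [Bool.not_eq_true] at hbr
      have hb := pv_not_br_not_bad l hbr
      have h1 := pv_not_br_one l.toList ['[', 'a', 'g', 'e', 'n', 't', ']'] (by decide) hbr
      have h2 := pv_not_br_one l.toList ['[', 'g', 'l', 'o', 'b', 'a', 'l', '_', 't', 'a', 'g', 's', ']'] (by decide) hbr
      have h3 := pv_not_br_one l.toList ['[', '[', 'o', 'u', 't', 'p', 'u', 't', 's', '.'] (by decide) hbr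
      cases skip <;> simp [pvARun, pvBRun, h1, h2, h3, hbr, hb, ih]

theorem pv_out_cons (c : List String) (ds : List (List String)) :
    pvP (c :: ds) = pvP ds ++ pvK c := by
  by_cases h : pvKeep c.reverse = true <;>
    simp [pvP, pvK, h, List.reverse_cons, List.map_append, List.filter_append,
      List.flatten_append, List.filter]

theorem pv_keep_rev (c : List String) : pvKeep c.reverse = !pvBadCur c := by
  cases hc : c.reverse with
  | nil =>
    have : c = [] := by simpa using congrArg List.reverse hc
    simp [this, pvKeep, pvBadCur]
  | cons h t =>
    have hcl : c.getLast? = some h := by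
      rw [List.getLast?_eq_head?_reverse, hc]; rfl
    simp [pvKeep, pvBadCur, hcl]

theorem pv_foldB (ls : List String) : ∀ (c : List String) (ds : List (List String)),
    pvP (ls.foldl pvGroupStep (c :: ds)) = pvP ds ++ pvK c ++ pvBRun (pvBadCur c) ls := by
  induction ls with
  | nil =>
    intro c ds
    rw [List.foldl_nil, pv_out_cons, show pvBRun (pvBadCur c) [] = [] from rfl, List.append_nil]
  | cons l ls ih =>
    intro c ds
    rw [List.foldl_cons]
    by_cases hbr : PySem.Chars.startswith l.toList ['['] = true
    · have hstep : pvGroupStep (c :: ds) l = [l] :: c :: ds := by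
        simp [pvGroupStep, hbr]
      rw [hstep, ih, pv_out_cons]
      have hbc : pvBadCur [l] = pvBad l := by simp [pvBadCur]
      by_cases hb : pvBad l = true
      · have hk : pvK [l] = [] := by simp [pvK, pvKeep, hb]
        simp [hbr, hb, hbc, hk, pvBRun, List.append_assoc]
      · simp only [Bool.not_eq_true] at hb
        have hk : pvK [l] = [l] := by simp [pvK, pvKeep, hb]
        simp [hbr, hb, hbc, hk, pvBRun, List.append_assoc]
    · simp only [Bool.not_eq_true] at hbr
      have hb := pv_not_br_not_bad l hbr
      have hstep : pvGroupStep (c :: ds) l = (l :: c) :: ds := by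
        simp [pvGroupStep, hbr]
      rw [hstep, ih]
      have hbc : pvBadCur (l :: c) = pvBadCur c := by
        cases c with
        | nil => simp [pvBadCur, hb]
        | cons x xs => simp [pvBadCur, List.getLast?_cons_cons]
      have hK : pvK (l :: c) = pvK c ++ (if pvBadCur c then [] else [l]) := by
        cases c with
        | nil => simp [pvK, pvKeep, pvBadCur, hb]
        | cons x xs =>
          have hkeep : pvKeep ((x :: xs).reverse ++ [l]) = pvKeep (x :: xs).reverse := by
            cases hr : (x :: xs).reverse with
            | nil => simp at hr
            | cons h2 t2 => simp [pvKeep]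
          have hbk := pv_keep_rev (x :: xs)
          rw [pvK, pvK, show (l :: x :: xs).reverse = (x :: xs).reverse ++ [l] by simp, hkeep]
          by_cases hbc2 : pvBadCur (x :: xs) = true <;> simp [hbc2] at hbk <;> simp [hbc2, hbk]
      rw [hbc, hK]
      by_cases hbc2 : pvBadCur c = true <;> simp [pvBRun, hbr, hbc2, List.append_assoc]

theorem pv_result_eq (ls : List String) :
    (ls.foldl pvStepA ([], false)).1
      = (((ls.foldl pvGroupStep [[]]).reverse.map List.reverse).filter pvKeep).flatten := by
  rw [pv_foldA ls [] false]
  have h := pv_foldB ls [] []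
  simp only [pvP] at h
  rw [h]
  simp [pvP, pvK, pvKeep, pvBadCur, pv_aRun_eq_bRun]

-- ===== VERDICT (by name: the statement is the Claim_ definition above) =====
theorem remove_conflicting_sections_spec : Claim_equal_remove_conflicting_sections := by
  intro config _
  show remove_conflicting_sections config = remove_conflicting_sections_alt config
  exact congrArg (PySem.Str.join "\n") (pv_result_eq (pvSplitLines config))
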